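-- pv_equiv track=rewrite | github.com/k-mlch/python_course | task4-2.py | collect_data_about_values
-- ===== SOURCE A (Python) =====
-- def collect_data_about_values(list_of_dicts):
--     common_dict = {} #the maximum value and the dictionary index where it was found
--     key_count = {}  #how many times a key appears across all dictionaries
--     dict_index = 1
--
--     for random_dict in list_of_dicts:
--         for key, value in random_dict.items():
--             if key in common_dict:
--                 if value > common_dict[key][0]:
--                     common_dict[key] = (value, dict_index)
--             else:
--                 common_dict[key] = (value, dict_index)
--
--             if key in key_count:
--                 key_count[key] += 1
--             else:
--                 key_count[key] = 1
--
--         dict_index += 1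
--
--     return common_dict, key_count
-- ===== SOURCE B (Python) =====
-- def collect_data_about_values(list_of_dicts):
--     # Build-table-then-reduce: one pass groups every (value, index) occurrence
--     # per key; a second pass reduces each group to its first maximum and length.
--     groups = {}
--     for dict_index, random_dict in enumerate(list_of_dicts, 1):
--         for key, value in random_dict.items():
--             groups.setdefault(key, []).append((value, dict_index))
--
--     common_dict = {}
--     key_count = {}
--     for key, pairs in groups.items():
--         common_dict[key] = max(pairs, key=lambda p: p[0])
--         key_count[key] = len(pairs)
--     return common_dict, key_count
-- ===== Notes on version B (the rewrite author's own statement) =====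
-- stated objective: alternative
-- what changed: A updates both result dicts per element with in-loop max/count branching; B first builds a grouping table of every (value, dict_index) occurrence per key in one pass, then reduces each group with max(pairs, key=first) and len in a second pass.
import Mathlib
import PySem

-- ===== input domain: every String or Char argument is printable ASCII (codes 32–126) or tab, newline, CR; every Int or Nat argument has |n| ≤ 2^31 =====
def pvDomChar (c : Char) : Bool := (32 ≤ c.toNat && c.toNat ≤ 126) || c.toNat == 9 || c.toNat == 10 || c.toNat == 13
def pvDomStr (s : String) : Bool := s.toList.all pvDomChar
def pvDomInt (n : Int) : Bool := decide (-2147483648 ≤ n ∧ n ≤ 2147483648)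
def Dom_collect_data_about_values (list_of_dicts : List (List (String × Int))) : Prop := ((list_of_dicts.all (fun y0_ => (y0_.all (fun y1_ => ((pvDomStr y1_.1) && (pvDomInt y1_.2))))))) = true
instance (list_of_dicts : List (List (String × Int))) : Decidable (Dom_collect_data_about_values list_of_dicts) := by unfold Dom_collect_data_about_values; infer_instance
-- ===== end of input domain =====

-- B replaces A's per-element max/count dict updates by a build-table-then-reduce shape:
-- one grouping pass collects every (value, index) occurrence per key, a second pass reduces
-- each group with max(..., key=fst) and len; same result, alternative decomposition.

-- ===== PORT A =====
-- A's inner loop body at dict index `idx`: update common_dict (s.1) and key_count (s.2) for one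
-- (key, value) pair.  `common_dict[key][0]` and `key_count[key] += 1` occur only under the
-- `key in …` guard, so the getD defaults (0,0) / 0 are never observed.
def cdavA_step (idx : Int) (s : PySem.Dict String (Int × Int) × PySem.Dict String Int)
    (kv : String × Int) : PySem.Dict String (Int × Int) × PySem.Dict String Int :=
  let c := if s.1.contains kv.1 then
             (if kv.2 > (s.1.getD kv.1 (0, 0)).1 then s.1.insert kv.1 (kv.2, idx) else s.1)
           else s.1.insert kv.1 (kv.2, idx)
  let n := if s.2.contains kv.1 then s.2.insert kv.1 (s.2.getD kv.1 0 + 1) else s.2.insert kv.1 1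
  (c, n)

def collect_data_about_values (list_of_dicts : List (List (String × Int))) :
    (List (String × Int × Int)) × (List (String × Int)) :=
  -- state: ((common_dict, key_count), dict_index), dict_index starts at 1 and steps per dict
  let st := list_of_dicts.foldl
    (fun (acc : (PySem.Dict String (Int × Int) × PySem.Dict String Int) × Int) random_dict =>
      (random_dict.foldl (cdavA_step acc.2) acc.1, acc.2 + 1))
    ((PySem.Dict.empty, PySem.Dict.empty), 1)
  (st.1.1.items, st.1.2.items)

-- ===== PORT B =====
-- groups.setdefault(key, []).append((value, dict_index))  ==  modify with default []
def cdavB_add (idx : Int) (g : PySem.Dict String (List (Int × Int))) (kv : String × Int) :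
    PySem.Dict String (List (Int × Int)) :=
  g.modify kv.1 [] (fun ps => ps ++ [(kv.2, idx)])

-- max(pairs, key=lambda p: p[0]); every group is nonempty, so the default is never observed
def cdavB_max (ps : List (Int × Int)) : Int × Int :=
  (PySem.List.max? ps (fun p => p.1)).getD (0, 0)

def collect_data_about_values_alt (list_of_dicts : List (List (String × Int))) :
    (List (String × Int × Int)) × (List (String × Int)) :=
  let groups := (PySem.List.enumerate list_of_dicts 1).foldl
      (fun g p => p.2.foldl (cdavB_add p.1) g) PySem.Dict.empty
  -- common_dict / key_count are dicts built over groups' distinct keys in groups order,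
  -- so their items lists are exactly these maps over groups.items
  (groups.items.map (fun kp => (kp.1, cdavB_max kp.2)),
   groups.items.map (fun kp => (kp.1, (kp.2.length : Int))))

-- ===== PRECONDITION & SPEC =====
def Spec_collect_data_about_values (list_of_dicts : List (List (String × Int))) (out : (List (String × Int × Int)) × (List (String × Int))) : Prop := out = collect_data_about_values_alt list_of_dicts
instance (list_of_dicts : List (List (String × Int))) (out : (List (String × Int × Int)) × (List (String × Int))) : Decidable (Spec_collect_data_about_values list_of_dicts out) := by unfold Spec_collect_data_about_values; infer_instance

-- ===== CLAIM (what is proved, stated in full; the proofs are below) =====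
def Claim_equal_collect_data_about_values : Prop := ∀ (list_of_dicts : List (List (String × Int))), Dom_collect_data_about_values list_of_dicts → Spec_collect_data_about_values list_of_dicts (collect_data_about_values list_of_dicts)

-- ===== LEMMAS AND PROOFS =====

-- A's two result dicts, expressed as the reductions of a grouping dict g
def cdavMapC (g : PySem.Dict String (List (Int × Int))) : PySem.Dict String (Int × Int) :=
  ⟨g.items.map (fun kp => (kp.1, cdavB_max kp.2))⟩
def cdavMapN (g : PySem.Dict String (List (Int × Int))) : PySem.Dict String Int :=
  ⟨g.items.map (fun kp => (kp.1, (kp.2.length : Int)))⟩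

-- invariant of the grouping dict: distinct keys, nonempty groups
def cdavInv (g : PySem.Dict String (List (Int × Int))) : Prop :=
  g.keys.Nodup ∧ ∀ kp ∈ g.items, kp.2 ≠ ([] : List (Int × Int))

theorem cdav_keys_mapC (g : PySem.Dict String (List (Int × Int))) :
    (cdavMapC g).keys = g.keys := by
  simp [cdavMapC, PySem.Dict.keys, List.map_map]

theorem cdav_keys_mapN (g : PySem.Dict String (List (Int × Int))) :
    (cdavMapN g).keys = g.keys := by
  simp [cdavMapN, PySem.Dict.keys, List.map_map]

theorem cdav_contains_mapC (g : PySem.Dict String (List (Int × Int))) (k : String) :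
    (cdavMapC g).contains k = g.contains k := by
  simp only [cdavMapC, PySem.Dict.contains, List.any_map]
  rfl

theorem cdav_contains_mapN (g : PySem.Dict String (List (Int × Int))) (k : String) :
    (cdavMapN g).contains k = g.contains k := by
  simp only [cdavMapN, PySem.Dict.contains, List.any_map]
  rfl

theorem cdav_max_snoc (ps : List (Int × Int)) (q : Int × Int) (h : ps ≠ []) :
    cdavB_max (ps ++ [q]) = if (cdavB_max ps).1 < q.1 then q else cdavB_max ps := by
  obtain ⟨m, hm⟩ : ∃ m, PySem.List.max? ps (fun p => p.1) = some m := by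
    cases hx : PySem.List.max? ps (fun p => p.1) with
    | none => exact absurd ((PySem.List.max?_eq_none_iff _ _).1 hx) h
    | some m => exact ⟨m, rfl⟩
  have h2 : PySem.List.max? (ps ++ [q]) (fun p => p.1)
      = if m.1 < q.1 then some q else some m := by
    simp only [PySem.List.max?] at hm ⊢
    rw [List.foldl_append, hm]
    simp
  simp only [cdavB_max, h2, hm, Option.getD_some]
  split_ifs <;> simp

theorem cdav_step (idx : Int) (kv : String × Int) (g : PySem.Dict String (List (Int × Int)))
    (h : cdavInv g) :
    cdavA_step idx (cdavMapC g, cdavMapN g) kv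
      = (cdavMapC (cdavB_add idx g kv), cdavMapN (cdavB_add idx g kv))
    ∧ cdavInv (cdavB_add idx g kv) := by
  obtain ⟨hnd, hne⟩ := h
  have hadd : cdavB_add idx g kv = g.insert kv.1 (g.getD kv.1 [] ++ [(kv.2, idx)]) := rfl
  have hinv' : cdavInv (cdavB_add idx g kv) := by
    refine ⟨PySem.Dict.nodup_keys_insert _ _ _ hnd, ?_⟩
    intro kp hkp
    rw [hadd] at hkp
    rcases (PySem.Dict.mem_items_insert _ _ _ _).1 hkp with h1 | h1
    · simp [h1]
    · exact hne kp h1.1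
  refine ⟨?_, hinv'⟩
  by_cases hc : g.contains kv.1 = true
  · -- key already present: a nonempty group ps for kv.1 exists
    obtain ⟨ps, hps⟩ : ∃ ps, g.get? kv.1 = some ps := by
      rw [PySem.Dict.contains_eq_isSome_get?] at hc
      cases hg : g.get? kv.1 with
      | none => rw [hg] at hc; simp at hc
      | some ps => exact ⟨ps, rfl⟩
    have hmem : (kv.1, ps) ∈ g.items := PySem.Dict.mem_items_of_get?_eq_some _ hps
    have hpsne : ps ≠ [] := hne _ hmem
    have hgetD : g.getD kv.1 [] = ps := PySem.Dict.getD_of_mem_items _ hmem hnd _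
    have hndC : (cdavMapC g).keys.Nodup := (cdav_keys_mapC g) ▸ hnd
    have hndN : (cdavMapN g).keys.Nodup := (cdav_keys_mapN g) ▸ hnd
    have hgC : (cdavMapC g).getD kv.1 (0, 0) = cdavB_max ps :=
      PySem.Dict.getD_of_mem_items _
        (List.mem_map_of_mem (f := fun kp => (kp.1, cdavB_max kp.2)) hmem) hndC _
    have hgN : (cdavMapN g).getD kv.1 0 = (ps.length : Int) :=
      PySem.Dict.getD_of_mem_items _
        (List.mem_map_of_mem (f := fun kp => (kp.1, (kp.2.length : Int))) hmem) hndN _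
    have hcC : (cdavMapC g).contains kv.1 = true := by rw [cdav_contains_mapC]; exact hc
    have hcN : (cdavMapN g).contains kv.1 = true := by rw [cdav_contains_mapN]; exact hc
    have huniq : ∀ kp ∈ g.items, kp.1 = kv.1 → kp.2 = ps := by
      intro kp hkp hk1
      have h2 : g.get? kp.1 = some kp.2 := PySem.Dict.get?_of_mem_items _ hkp hnd
      rw [hk1, hps] at h2
      exact (Option.some_injective _ h2).symm
    -- the key_count component (unconditional)
    have hN : (cdavMapN g).insert kv.1 ((ps.length : Int) + 1) = cdavMapN (cdavB_add idx g kv) := by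
      apply PySem.Dict.ext
      rw [hadd, hgetD]
      show ((cdavMapN g).insert kv.1 ((ps.length : Int) + 1)).items
        = ((g.insert kv.1 (ps ++ [(kv.2, idx)])).items).map (fun kp => (kp.1, (kp.2.length : Int)))
      rw [PySem.Dict.items_insert_of_contains _ _ hcN, PySem.Dict.items_insert_of_contains _ _ hc]
      show (g.items.map (fun kp => (kp.1, (kp.2.length : Int)))).map _ = _
      rw [List.map_map, List.map_map]
      apply List.map_congr_left
      intro kp _
      by_cases hk : kp.1 = kv.1 <;> simp [Function.comp, hk]
    -- the common_dict component
    have hC1 : (cdavB_max ps).1 < kv.2 →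
        (cdavMapC g).insert kv.1 (kv.2, idx) = cdavMapC (cdavB_add idx g kv) := by
      intro hgt
      apply PySem.Dict.ext
      rw [hadd, hgetD]
      show ((cdavMapC g).insert kv.1 (kv.2, idx)).items
        = ((g.insert kv.1 (ps ++ [(kv.2, idx)])).items).map (fun kp => (kp.1, cdavB_max kp.2))
      rw [PySem.Dict.items_insert_of_contains _ _ hcC, PySem.Dict.items_insert_of_contains _ _ hc]
      show (g.items.map (fun kp => (kp.1, cdavB_max kp.2))).map _ = _
      rw [List.map_map, List.map_map]
      apply List.map_congr_left
      intro kp _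
      by_cases hk : kp.1 = kv.1 <;>
        simp [Function.comp, hk, cdav_max_snoc ps (kv.2, idx) hpsne, hgt]
    have hC2 : ¬ (cdavB_max ps).1 < kv.2 →
        cdavMapC g = cdavMapC (cdavB_add idx g kv) := by
      intro hle
      apply PySem.Dict.ext
      rw [hadd, hgetD]
      show (cdavMapC g).items
        = ((g.insert kv.1 (ps ++ [(kv.2, idx)])).items).map (fun kp => (kp.1, cdavB_max kp.2))
      rw [PySem.Dict.items_insert_of_contains _ _ hc]
      show g.items.map (fun kp => (kp.1, cdavB_max kp.2)) = _
      rw [List.map_map]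
      apply List.map_congr_left
      intro kp hkp
      by_cases hk : kp.1 = kv.1
      · have h2 : kp.2 = ps := huniq kp hkp hk
        simp [Function.comp, hk, h2, cdav_max_snoc ps (kv.2, idx) hpsne, hle]
      · simp [Function.comp, hk]
    simp only [cdavA_step, hcC, hcN, hgC, hgN, if_true]
    by_cases hgt : (cdavB_max ps).1 < kv.2
    · simp only [gt_iff_lt, hgt, if_true]
      exact Prod.ext (hC1 hgt) hN
    · simp only [gt_iff_lt, hgt, if_false]
      exact Prod.ext (hC2 hgt) hN
  · -- new key: both sides append
    have hcb : g.contains kv.1 = false := by simpa using hc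
    have hcC : (cdavMapC g).contains kv.1 = false := by rw [cdav_contains_mapC]; exact hcb
    have hcN : (cdavMapN g).contains kv.1 = false := by rw [cdav_contains_mapN]; exact hcb
    have hgetD : g.getD kv.1 [] = [] := PySem.Dict.getD_of_not_contains _ _ hcb
    have hmax1 : cdavB_max [(kv.2, idx)] = (kv.2, idx) := rfl
    simp only [cdavA_step, hcC, hcN, Bool.false_eq_true, if_false]
    refine Prod.ext ?_ ?_
    · apply PySem.Dict.ext
      rw [hadd, hgetD]
      show ((cdavMapC g).insert kv.1 (kv.2, idx)).items
        = ((g.insert kv.1 ([] ++ [(kv.2, idx)])).items).map (fun kp => (kp.1, cdavB_max kp.2))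
      rw [PySem.Dict.items_insert_of_not_contains _ _ hcC,
          PySem.Dict.items_insert_of_not_contains _ _ hcb]
      simp [cdavMapC, hmax1]
    · apply PySem.Dict.ext
      rw [hadd, hgetD]
      show ((cdavMapN g).insert kv.1 1).items
        = ((g.insert kv.1 ([] ++ [(kv.2, idx)])).items).map (fun kp => (kp.1, (kp.2.length : Int)))
      rw [PySem.Dict.items_insert_of_not_contains _ _ hcN,
          PySem.Dict.items_insert_of_not_contains _ _ hcb]
      simp [cdavMapN]

theorem cdav_inner (idx : Int) (rd : List (String × Int))
    (g : PySem.Dict String (List (Int × Int))) (h : cdavInv g) :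
    rd.foldl (cdavA_step idx) (cdavMapC g, cdavMapN g)
      = (cdavMapC (rd.foldl (cdavB_add idx) g), cdavMapN (rd.foldl (cdavB_add idx) g))
    ∧ cdavInv (rd.foldl (cdavB_add idx) g) := by
  induction rd generalizing g with
  | nil => exact ⟨rfl, h⟩
  | cons kv rd ih =>
    obtain ⟨hstep, hinv⟩ := cdav_step idx kv g h
    simpa [hstep] using ih _ hinv

theorem cdav_outer (l : List (List (String × Int))) (idx : Int)
    (g : PySem.Dict String (List (Int × Int))) (h : cdavInv g) :
    l.foldl
      (fun (acc : (PySem.Dict String (Int × Int) × PySem.Dict String Int) × Int) random_dict =>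
        (random_dict.foldl (cdavA_step acc.2) acc.1, acc.2 + 1))
      ((cdavMapC g, cdavMapN g), idx)
      = ((cdavMapC ((PySem.List.enumerate l idx).foldl (fun g p => p.2.foldl (cdavB_add p.1) g) g),
          cdavMapN ((PySem.List.enumerate l idx).foldl (fun g p => p.2.foldl (cdavB_add p.1) g) g)),
         idx + l.length) := by
  induction l generalizing g idx with
  | nil => simp [PySem.List.enumerate]
  | cons rd l ih =>
    obtain ⟨hstep, hinv⟩ := cdav_inner idx rd g h
    rw [List.foldl_cons, PySem.List.enumerate_cons, List.foldl_cons]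
    simp only [hstep]
    rw [ih (idx + 1) _ hinv]
    congr 1
    simp only [List.length_cons]
    push_cast
    ring

-- ===== VERDICT (by name: the statement is the Claim_ definition above) =====
theorem collect_data_about_values_spec : Claim_equal_collect_data_about_values := by
  intro l _
  unfold Spec_collect_data_about_values collect_data_about_values collect_data_about_values_alt
  have h0 : cdavInv PySem.Dict.empty := ⟨List.nodup_nil, by simp [PySem.Dict.empty]⟩
  have h := cdav_outer l 1 PySem.Dict.empty h0
  rw [show ((PySem.Dict.empty : PySem.Dict String (Int × Int)),
        (PySem.Dict.empty : PySem.Dict String Int))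
      = (cdavMapC PySem.Dict.empty, cdavMapN PySem.Dict.empty) from rfl, h]
  rfl
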